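-- pv_equiv track=rewrite | github.com/deepk2001/Human_Motion_Classifier | generate_dataset.py | get_joint_headers
-- ===== SOURCE A (Python) =====
-- def get_joint_headers(num_joints):
--     headers = []
--     for i in range(num_joints):
--         headers.extend(
--             [
--                 f"joint{i}_x",
--                 f"joint{i}_y",
--                 f"joint{i}_z",
--                 f"joint{i}_yaw",
--                 f"joint{i}_pitch",
--                 f"joint{i}_roll",
--                 f"joint{i}_conf",
--             ]
--         )
--     return headers
-- ===== SOURCE B (Python) =====
-- SUFFIXES = ("x", "y", "z", "yaw", "pitch", "roll", "conf")
--
-- def get_joint_headers(num_joints):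
--     # Build one column per suffix (suffix-major), then transpose with zip
--     # to recover the joint-major order and flatten.
--     cols = [[f"joint{i}_{s}" for i in range(num_joints)] for s in SUFFIXES]
--     return [h for row in zip(*cols) for h in row]
-- ===== Notes on version B (the rewrite author's own statement) =====
-- stated objective: alternative
-- what changed: B builds seven suffix-major columns (one list per suffix over all joints) and then transposes them with zip and flattens, instead of A's single joint-major pass extending with seven literal strings per joint.
import Mathlib
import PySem

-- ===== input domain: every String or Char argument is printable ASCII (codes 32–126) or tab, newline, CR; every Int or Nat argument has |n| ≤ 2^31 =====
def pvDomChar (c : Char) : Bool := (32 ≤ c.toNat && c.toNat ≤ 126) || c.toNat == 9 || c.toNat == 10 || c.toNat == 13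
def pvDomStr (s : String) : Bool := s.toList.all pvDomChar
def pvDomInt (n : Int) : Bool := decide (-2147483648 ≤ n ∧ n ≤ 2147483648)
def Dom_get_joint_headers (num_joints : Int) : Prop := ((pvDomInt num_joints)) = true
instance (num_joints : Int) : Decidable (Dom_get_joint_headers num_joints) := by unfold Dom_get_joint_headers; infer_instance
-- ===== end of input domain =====

-- B builds suffix-major columns and transposes them, instead of A's joint-major pass; alternative decomposition, same cost.

-- ===== PORT A =====
-- Port of A: loop over range(num_joints), extend with the seven literal header strings.
def get_joint_headers (num_joints : Int) : List String :=
  (PySem.List.pyRange 0 num_joints 1).foldl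
    (fun headers i =>
      headers ++
        [ "joint" ++ PySem.Int.toStr i ++ "_x",
          "joint" ++ PySem.Int.toStr i ++ "_y",
          "joint" ++ PySem.Int.toStr i ++ "_z",
          "joint" ++ PySem.Int.toStr i ++ "_yaw",
          "joint" ++ PySem.Int.toStr i ++ "_pitch",
          "joint" ++ PySem.Int.toStr i ++ "_roll",
          "joint" ++ PySem.Int.toStr i ++ "_conf" ]) []

-- ===== PORT B =====
def pvSuffixes : List String := ["x", "y", "z", "yaw", "pitch", "roll", "conf"]

-- zip(*cols): take one head from every column while all columns are nonempty
-- (fuel = common column length; each column has exactly that many elements).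
def pvZipCols : Nat → List (List String) → List (List String)
  | 0, _ => []
  | Nat.succ k, cols =>
    if cols.all (fun c => !c.isEmpty) then
      cols.filterMap List.head? :: pvZipCols k (cols.map List.tail)
    else []

-- Port of B: suffix-major columns, then transpose with zip and flatten.
def get_joint_headers_alt (num_joints : Int) : List String :=
  let rng := PySem.List.pyRange 0 num_joints 1
  let cols := pvSuffixes.map
    (fun s => rng.map (fun i => "joint" ++ PySem.Int.toStr i ++ "_" ++ s))
  ((pvZipCols rng.length cols).flatMap (fun row => row))

-- ===== PRECONDITION & SPEC =====
def Spec_get_joint_headers (num_joints : Int) (out : List String) : Prop := out = get_joint_headers_alt num_joints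
instance (num_joints : Int) (out : List String) : Decidable (Spec_get_joint_headers num_joints out) := by unfold Spec_get_joint_headers; infer_instance

-- ===== CLAIM (what is proved, stated in full; the proofs are below) =====
def Claim_equal_get_joint_headers : Prop := ∀ (num_joints : Int), Dom_get_joint_headers num_joints → Spec_get_joint_headers num_joints (get_joint_headers num_joints)

-- ===== LEMMAS AND PROOFS =====

-- Transposing suffix-major columns recovers the joint-major rows.
theorem pvZipCols_map (g : String → Int → String) (rng : List Int) (sufs : List String) :
    pvZipCols rng.length (sufs.map (fun s => rng.map (g s)))
      = rng.map (fun i => sufs.map (fun s => g s i)) := by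
  induction rng generalizing sufs with
  | nil => simp [pvZipCols]
  | cons i rest ih =>
    simp only [List.length_cons, pvZipCols, List.map_cons]
    rw [if_pos]
    · have h1 : (sufs.map (fun s => g s i :: rest.map (g s))).filterMap List.head?
          = sufs.map (fun s => g s i) := by
        simp [List.filterMap_map, Function.comp]
      have h2 : (sufs.map (fun s => g s i :: rest.map (g s))).map List.tail
          = sufs.map (fun s => rest.map (g s)) := by
        simp [List.map_map, Function.comp]
      rw [h1, h2, ih]
    · simp

-- ===== VERDICT (by name: the statement is the Claim_ definition above) =====
theorem get_joint_headers_spec : Claim_equal_get_joint_headers := by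
  intro n _
  unfold Spec_get_joint_headers get_joint_headers get_joint_headers_alt
  rw [PySem.List.foldl_append_eq_flatMap]
  simp only [List.nil_append]
  rw [pvZipCols_map (fun s i => "joint" ++ PySem.Int.toStr i ++ "_" ++ s)]
  rw [List.flatMap_map]
  apply List.flatMap_congr
  intro i _
  simp [pvSuffixes, List.map]
  refine ⟨?_, ?_, ?_, ?_, ?_, ?_, ?_⟩ <;>
    (simp only [String.append_assoc]; congr 2)
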